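-- pv_equiv track=rewrite | github.com/yhbian/niuke | JZ40.py | FindNumsAppearOnce
-- ===== SOURCE A (Python) =====
-- def FindNumsAppearOnce(array):
--     # write code here
--     count = {}
--     for num in array:
--         if num in count.keys():
--             count[num] += 1
--         else:
--             count[num] = 1
--     result = []
--     for key, value in count.items():
--         if value == 1:
--             result.append(key)
--     return result
-- ===== SOURCE B (Python) =====
-- def FindNumsAppearOnce(array):
--     return [x for x in array if array.count(x) == 1]
-- ===== Notes on version B (the rewrite author's own statement) =====
-- stated objective: simpler
-- what changed: A's two-pass build of an explicit frequency dict followed by a filtering loop over its items is replaced by a single comprehension that rescans the list with list.count for each element; no table is built.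
import Mathlib
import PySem

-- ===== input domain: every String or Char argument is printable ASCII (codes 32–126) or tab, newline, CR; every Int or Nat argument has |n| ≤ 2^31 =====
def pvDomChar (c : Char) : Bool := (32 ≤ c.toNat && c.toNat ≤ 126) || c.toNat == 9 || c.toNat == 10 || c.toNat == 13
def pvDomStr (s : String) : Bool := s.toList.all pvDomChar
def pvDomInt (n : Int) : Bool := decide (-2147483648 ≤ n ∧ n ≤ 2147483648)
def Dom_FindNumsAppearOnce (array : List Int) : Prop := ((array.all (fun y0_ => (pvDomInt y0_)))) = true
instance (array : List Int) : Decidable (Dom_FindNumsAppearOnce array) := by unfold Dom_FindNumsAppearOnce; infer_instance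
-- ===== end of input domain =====

-- B replaces A's frequency-dict build + items scan by one comprehension rescanning the list with count (simpler, same values).

-- ===== PORT A =====
def FindNumsAppearOnce (array : List Int) : List Int :=
  let count := array.foldl
    (fun d num => if d.contains num then d.insert num (d.getD num 0 + 1) else d.insert num 1)
    (PySem.Dict.empty : PySem.Dict Int Int)
  count.items.foldl (fun result kv => if kv.2 == 1 then result ++ [kv.1] else result) []

-- ===== PORT B =====
def FindNumsAppearOnce_alt (array : List Int) : List Int :=
  array.filter (fun x => array.count x == 1)

-- ===== PRECONDITION & SPEC =====
def Spec_FindNumsAppearOnce (array : List Int) (out : List Int) : Prop := out = FindNumsAppearOnce_alt array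
instance (array : List Int) (out : List Int) : Decidable (Spec_FindNumsAppearOnce array out) := by unfold Spec_FindNumsAppearOnce; infer_instance

-- ===== CLAIM (what is proved, stated in full; the proofs are below) =====
def Claim_equal_FindNumsAppearOnce : Prop := ∀ (array : List Int), Dom_FindNumsAppearOnce array → Spec_FindNumsAppearOnce array (FindNumsAppearOnce array)

-- ===== LEMMAS AND PROOFS =====

-- A's counting loop is the Counter loop: when a key is fresh, inserting 1 IS inserting getD+1.
theorem pv_fold_eq_counter (array : List Int) :
    array.foldl
      (fun d num => if d.contains num then d.insert num (d.getD num 0 + 1) else d.insert num 1)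
      PySem.Dict.empty = PySem.Dict.counter array := by
  rw [PySem.List.foldl_congr_mem array _ (fun d x => d.insert x (d.getD x 0 + 1)) _ ?_]
  · exact PySem.Dict.foldl_insert_getD_add_one_eq_counter array
  · intro d x _
    by_cases h : d.contains x
    · simp [h]
    · simp only [Bool.not_eq_true] at h
      simp [h, PySem.Dict.getD_of_not_contains d 0 h]

-- Filtering first occurrences by a predicate that only holds on count-1 elements equals filtering the list itself.
theorem pv_filter_ofList (p : Int → Bool) :
    ∀ (xs acc : List Int), (∀ x, p x = true → ((acc ++ xs).count x ≤ 1)) →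
      (xs.foldl PySem.Set.add acc).filter p = acc.filter p ++ xs.filter p := by
  intro xs
  induction xs with
  | nil => intro acc _; simp
  | cons x t ih =>
    intro acc h
    simp only [List.foldl_cons]
    by_cases hc : acc.contains x
    · have hmem : x ∈ acc := List.mem_of_elem_eq_true hc
      have hpx : p x = false := by
        by_contra hpx
        simp only [Bool.not_eq_false] at hpx
        have := h x hpx
        have h1 : 1 ≤ acc.count x := List.one_le_count_iff.mpr hmem
        simp only [List.count_append, List.count_cons_self] at this
        omega
      have : PySem.Set.add acc x = acc := by simp [PySem.Set.add, hmem]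
      rw [this, ih acc ?_]
      · simp [hpx]
      · intro y hy
        have := h y hy
        simp only [List.count_append, List.count_cons] at this ⊢
        by_cases hxy : x = y <;> simp [hxy] at this ⊢ <;> omega
    · have hnm : x ∉ acc := by intro hm; exact hc (List.elem_eq_true_of_mem hm)
      have : PySem.Set.add acc x = acc ++ [x] := by simp [PySem.Set.add, hnm]
      rw [this, ih (acc ++ [x]) ?_]
      · simp only [List.filter_append, List.filter_cons]
        cases hpx : p x <;> simp
      · intro y hy
        have := h y hy
        simp only [List.count_append, List.count_cons] at this ⊢
        by_cases hxy : x = y <;> simp [hxy] at this ⊢ <;> omega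

-- ===== VERDICT (by name: the statement is the Claim_ definition above) =====
theorem FindNumsAppearOnce_spec : Claim_equal_FindNumsAppearOnce := by
  intro array _
  unfold Spec_FindNumsAppearOnce FindNumsAppearOnce FindNumsAppearOnce_alt
  simp only [pv_fold_eq_counter]
  rw [PySem.List.foldl_append_if (fun kv => kv.2 == 1) Prod.fst _ []]
  rw [PySem.Dict.items_counter]
  rw [List.filter_map, List.map_map]
  have hpred : ((fun kv => kv.2 == 1) ∘ fun k => (k, (List.count k array : Int)))
      = fun k => List.count k array == 1 := by
    funext k
    simp [Function.comp]
  rw [hpred]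
  simp only [List.nil_append]
  have hmap : (Prod.fst ∘ fun k => (k, (List.count k array : Int))) = id := by
    funext k; rfl
  rw [hmap, List.map_id]
  have := pv_filter_ofList (fun k => List.count k array == 1) array [] ?_
  · simpa [PySem.Set.ofList, PySem.Set.empty] using this
  · intro x hx
    simp only [beq_iff_eq] at hx
    simp [hx]
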